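-- pv_equiv track=rewrite | github.com/sarakjc/robocalypse | robo1.py | listshurtme
-- ===== SOURCE A (Python) =====
-- def listshurtme(death, coords, thing, rect, draw):
--     if draw.count(0) > 0:
--         # delete items in lists
--         for i in range(death):
--             coords.pop(draw.index(0))
--             thing.pop(draw.index(0))
--             rect.pop(draw.index(0))
--             draw.pop(draw.index(0))
--     return coords, thing, rect, draw
-- ===== SOURCE B (Python) =====
-- def listshurtme(death, coords, thing, rect, draw):
--     # One pass: collect the indices of the first `death` zeros in draw,
--     # then rebuild each list skipping exactly those indices (in place,
--     # like the original's pops).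
--     zeros = [i for i, d in enumerate(draw) if d == 0]
--     dead = set(zeros[:death]) if death > 0 else set()
--     coords[:] = [c for i, c in enumerate(coords) if i not in dead]
--     thing[:] = [t for i, t in enumerate(thing) if i not in dead]
--     rect[:] = [r for i, r in enumerate(rect) if i not in dead]
--     draw[:] = [d for i, d in enumerate(draw) if i not in dead]
--     return coords, thing, rect, draw
-- ===== Notes on version B (the rewrite author's own statement) =====
-- stated objective: alternative
-- what changed: Instead of looping `death` times and re-scanning with draw.index(0) plus four pops per iteration, B collects the indices of the first `death` zeros in one pass and rebuilds each list once, skipping that index set.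
import Mathlib
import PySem

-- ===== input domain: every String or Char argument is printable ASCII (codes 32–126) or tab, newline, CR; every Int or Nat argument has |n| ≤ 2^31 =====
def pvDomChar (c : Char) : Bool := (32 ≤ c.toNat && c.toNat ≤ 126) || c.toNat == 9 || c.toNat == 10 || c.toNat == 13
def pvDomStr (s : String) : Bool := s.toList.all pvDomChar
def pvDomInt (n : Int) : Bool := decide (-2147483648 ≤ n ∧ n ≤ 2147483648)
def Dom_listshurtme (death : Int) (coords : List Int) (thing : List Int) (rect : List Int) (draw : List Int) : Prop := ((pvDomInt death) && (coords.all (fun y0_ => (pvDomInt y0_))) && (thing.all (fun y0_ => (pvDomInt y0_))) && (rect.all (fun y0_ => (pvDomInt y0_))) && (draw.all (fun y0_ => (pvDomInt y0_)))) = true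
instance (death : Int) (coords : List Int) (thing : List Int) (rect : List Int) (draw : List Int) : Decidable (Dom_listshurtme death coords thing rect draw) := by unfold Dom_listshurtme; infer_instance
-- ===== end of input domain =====

-- B replaces A's death× (index-scan + four pops) loop with one pass that collects the first `death`
-- zero indices and rebuilds each list once (objective: alternative single-pass algorithm). Python A
-- and B both mutate the four list arguments in place the same way on Pre_; the theorems below are
-- about the returned value.

-- ===== PORT A =====
-- one iteration of A's loop body; none = the Python raised (ValueError/IndexError)
def pvStepA (s : List Int × List Int × List Int × List Int) : Option (List Int × List Int × List Int × List Int) :=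
  (PySem.List.index? s.2.2.2 0).bind fun i1 =>
  (PySem.List.pop? s.1 (i1 : Int)).bind fun pc =>
  (PySem.List.index? s.2.2.2 0).bind fun i2 =>
  (PySem.List.pop? s.2.1 (i2 : Int)).bind fun pt =>
  (PySem.List.index? s.2.2.2 0).bind fun i3 =>
  (PySem.List.pop? s.2.2.1 (i3 : Int)).bind fun pr =>
  (PySem.List.index? s.2.2.2 0).bind fun i4 =>
  (PySem.List.pop? s.2.2.2 (i4 : Int)).map fun pd =>
  (pc.2, pt.2, pr.2, pd.2)

def listshurtme (death : Int) (coords : List Int) (thing : List Int) (rect : List Int) (draw : List Int) : List Int × List Int × List Int × List Int :=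
  if PySem.List.count draw 0 > 0 then
    -- the default is only reached where the Python loop raises; excluded by Pre_
    ((PySem.List.pyRange 0 death 1).foldl (fun acc _ => acc.bind pvStepA)
      (some (coords, thing, rect, draw))).getD (coords, thing, rect, draw)
  else (coords, thing, rect, draw)

-- ===== PORT B =====
-- dead = set(zeros[:death]) if death > 0 else set(), with zeros the indices of draw's zero entries
def pvDead (death : Int) (draw : List Int) : PySem.Set Int :=
  if death > 0 then
    PySem.Set.ofList (PySem.List.slice
      (((PySem.List.enumerate draw 0).filter (fun q => q.2 == 0)).map (·.1)) none (some death))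
  else PySem.Set.empty

-- one rebuilding comprehension: [v for i, v in enumerate(xs) if i not in dead]
def pvKeep (dead : PySem.Set Int) (xs : List Int) : List Int :=
  ((PySem.List.enumerate xs 0).filter (fun q => !(PySem.Set.contains dead q.1))).map (·.2)

def listshurtme_alt (death : Int) (coords : List Int) (thing : List Int) (rect : List Int) (draw : List Int) : List Int × List Int × List Int × List Int :=
  (pvKeep (pvDead death draw) coords, pvKeep (pvDead death draw) thing,
   pvKeep (pvDead death draw) rect, pvKeep (pvDead death draw) draw)

-- ===== PRECONDITION & SPEC =====
-- positions of the zero entries of a list, in increasing order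
def pvZpos : List Int → List Nat
  | [] => []
  | e :: d => if e = 0 then 0 :: (pvZpos d).map (· + 1) else (pvZpos d).map (· + 1)

-- Pre_ = exactly the inputs on which A returns: when the loop runs (death > 0 and some zero in draw),
-- draw must hold at least `death` zeros and each of the first `death` zero positions must be in range
-- of the other three lists (otherwise A raises ValueError/IndexError).
def Pre_listshurtme (death : Int) (coords : List Int) (thing : List Int) (rect : List Int) (draw : List Int) : Prop :=
  death ≤ 0 ∨ (0:Int) ∉ draw ∨
    (death.toNat ≤ (pvZpos draw).length ∧
     ∀ p ∈ (pvZpos draw).take death.toNat, p < coords.length ∧ p < thing.length ∧ p < rect.length)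
instance (death : Int) (coords : List Int) (thing : List Int) (rect : List Int) (draw : List Int) : Decidable (Pre_listshurtme death coords thing rect draw) := by unfold Pre_listshurtme; infer_instance

def pvWitness_listshurtme : Int × List Int × List Int × List Int × List Int := (1, [10, 20], [30, 40], [50, 60], [0, 1])

def Spec_listshurtme (death : Int) (coords : List Int) (thing : List Int) (rect : List Int) (draw : List Int) (out : List Int × List Int × List Int × List Int) : Prop := out = listshurtme_alt death coords thing rect draw
instance (death : Int) (coords : List Int) (thing : List Int) (rect : List Int) (draw : List Int) (out : List Int × List Int × List Int × List Int) : Decidable (Spec_listshurtme death coords thing rect draw out) := by unfold Spec_listshurtme; infer_instance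

-- ===== CLAIM (what is proved, stated in full; the proofs are below) =====
def Claim_equal_listshurtme : Prop := ∀ (death : Int) (coords : List Int) (thing : List Int) (rect : List Int) (draw : List Int), Dom_listshurtme death coords thing rect draw → Pre_listshurtme death coords thing rect draw → Spec_listshurtme death coords thing rect draw (listshurtme death coords thing rect draw)

-- ===== LEMMAS AND PROOFS =====

-- common reference semantics: drop from xs the entries at the positions of the first n zeros of d
def pvRmz : Nat → List Int → List Int → List Int
  | 0, _, xs => xs
  | _+1, [], xs => xs
  | _+1, _ :: _, [] => []
  | n+1, e :: d, x :: xs => if e = 0 then pvRmz n d xs else x :: pvRmz (n+1) d xs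

-- keep the elements of xs whose (absolute) index, starting at s, is not in Z
def pvKeepIdx (Z : List Int) : Int → List Int → List Int
  | _, [] => []
  | s, x :: xs => if Z.contains s then pvKeepIdx Z (s+1) xs else x :: pvKeepIdx Z (s+1) xs

theorem pvRmz_nil (n : Nat) (d : List Int) : pvRmz n d [] = [] := by
  cases n <;> cases d <;> simp [pvRmz]

theorem pvRmz_cons_of_ne (n : Nat) (e : Int) (d : List Int) (x : Int) (xs : List Int) (h : e ≠ 0) :
    pvRmz n (e :: d) (x :: xs) = x :: pvRmz n d xs := by
  cases n <;> simp [pvRmz, h]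

theorem pvZpos_lt_length (d : List Int) : ∀ p ∈ pvZpos d, p < d.length := by
  induction d with
  | nil => simp [pvZpos]
  | cons e d ih =>
    intro p hp
    by_cases h : e = 0
    · rw [pvZpos, if_pos h] at hp
      rcases List.mem_cons.mp hp with rfl | hp'
      · simp
      · obtain ⟨q, hq, rfl⟩ := List.mem_map.mp hp'
        have := ih q hq
        simp; omega
    · rw [pvZpos, if_neg h] at hp
      obtain ⟨q, hq, rfl⟩ := List.mem_map.mp hp
      have := ih q hq
      simp; omega

theorem pvZpos_nil_iff (d : List Int) : pvZpos d = [] ↔ (0:Int) ∉ d := by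
  induction d with
  | nil => simp [pvZpos]
  | cons e d ih =>
    by_cases h : e = 0
    · rw [pvZpos, if_pos h]
      constructor
      · intro hc; exact (List.cons_ne_nil _ _ hc).elim
      · intro hc; subst h; exact (hc (List.mem_cons_self)).elim
    · rw [pvZpos, if_neg h, List.map_eq_nil_iff, ih]
      constructor
      · intro hnd hm
        rcases List.mem_cons.mp hm with h0 | h0
        · exact h h0.symm
        · exact hnd h0
      · intro hnd h0
        exact hnd (List.mem_cons_of_mem _ h0)

theorem pvZpos_pairwise (d : List Int) : (pvZpos d).Pairwise (· < ·) := by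
  induction d with
  | nil => simp [pvZpos]
  | cons e d ih =>
    have hmap : ((pvZpos d).map (· + 1)).Pairwise (· < ·) := by
      rw [List.pairwise_map]; exact ih.imp (by omega)
    by_cases h : e = 0
    · rw [pvZpos, if_pos h]
      refine List.pairwise_cons.mpr ⟨?_, hmap⟩
      intro q hq
      obtain ⟨q', _, rfl⟩ := List.mem_map.mp hq
      omega
    · rw [pvZpos, if_neg h]; exact hmap

theorem pvIndex?_zero (d : List Int) (h : (0:Int) ∈ d) :
    PySem.List.index? d 0 = some ((pvZpos d).headI) := by
  induction d with
  | nil => simp at h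
  | cons e d ih =>
    by_cases he : e = 0
    · subst he
      rw [PySem.List.index?_cons_self]
      simp [pvZpos]
    · have hd : (0:Int) ∈ d := by
        rcases List.mem_cons.mp h with h0 | h0
        · exact absurd h0.symm he
        · exact h0
      have hne : pvZpos d ≠ [] := fun hnil => ((pvZpos_nil_iff d).mp hnil) hd
      rw [PySem.List.index?_cons_of_ne d he, ih hd]
      cases hz : pvZpos d with
      | nil => exact absurd hz hne
      | cons q qs => simp [pvZpos, he, hz]

theorem pvZpos_erase (d : List Int) (p : Nat) (rest : List Nat) (h : pvZpos d = p :: rest) :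
    pvZpos (d.eraseIdx p) = rest.map (· - 1) := by
  induction d generalizing p rest with
  | nil => simp [pvZpos] at h
  | cons e d ih =>
    by_cases he : e = 0
    · rw [pvZpos, if_pos he] at h
      obtain ⟨h1, h2⟩ := List.cons_eq_cons.mp h
      subst h1; subst h2
      simp only [List.eraseIdx_cons_zero, List.map_map]
      conv_lhs => rw [← List.map_id (pvZpos d)]
      apply List.map_congr_left
      intro a _; simp
    · rw [pvZpos, if_neg he] at h
      cases hz : pvZpos d with
      | nil => rw [hz] at h; simp at h
      | cons q qs =>
        rw [hz] at h
        simp only [List.map_cons] at h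
        have hp : p = q + 1 := (List.head_eq_of_cons_eq h).symm
        have hrest : rest = qs.map (· + 1) := (List.tail_eq_of_cons_eq h).symm
        subst hp; subst hrest
        have herase : (e :: d).eraseIdx (q + 1) = e :: d.eraseIdx q := by
          simp [List.eraseIdx]
        rw [herase, pvZpos, if_neg he, ih q qs hz, List.map_map, List.map_map]
        apply List.map_congr_left
        intro a ha
        have hq : ∀ x ∈ qs, q < x := by
          have := pvZpos_pairwise d
          rw [hz] at this
          exact (List.pairwise_cons.mp this).1
        have := hq a ha
        simp; omega

-- A's loop step succeeds and pops position p (= first zero of d) from each list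
theorem pvStepA_eq (c t r d : List Int) (p : Nat)
    (hd : (0:Int) ∈ d) (hp : (pvZpos d).headI = p)
    (hc : p < c.length) (ht : p < t.length) (hr : p < r.length) :
    pvStepA (c, t, r, d) = some (c.eraseIdx p, t.eraseIdx p, r.eraseIdx p, d.eraseIdx p) := by
  have hne : pvZpos d ≠ [] := fun hnil => ((pvZpos_nil_iff d).mp hnil) hd
  have hpd : p < d.length := by
    apply pvZpos_lt_length
    cases hz : pvZpos d with
    | nil => exact absurd hz hne
    | cons q qs => rw [hz] at hp; simp at hp; simp [hz, hp]
  have hidx := pvIndex?_zero d hd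
  rw [hp] at hidx
  simp only [pvStepA]
  rw [hidx]
  simp only [Option.bind_some]
  rw [PySem.List.pop?_natCast c p hc]
  simp only [Option.bind_some]
  rw [PySem.List.pop?_natCast t p ht]
  simp only [Option.bind_some]
  rw [PySem.List.pop?_natCast r p hr]
  simp only [Option.bind_some]
  rw [PySem.List.pop?_natCast d p hpd]
  rfl

-- shifting pvRmz past the first zero
theorem pvRmz_shift (d : List Int) (xs : List Int) (n : Nat) (hd : (0:Int) ∈ d) :
    pvRmz (n+1) d xs = pvRmz n (d.eraseIdx ((pvZpos d).headI)) (xs.eraseIdx ((pvZpos d).headI)) := by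
  induction d generalizing xs with
  | nil => simp at hd
  | cons e d ih =>
    by_cases he : e = 0
    · subst he
      simp only [pvZpos, if_pos rfl, List.headI_cons, List.eraseIdx_cons_zero]
      cases xs with
      | nil => simp [pvRmz, pvRmz_nil]
      | cons x xs => simp [pvRmz]
    · have hd' : (0:Int) ∈ d := by
        rcases List.mem_cons.mp hd with h0 | h0
        · exact absurd h0.symm he
        · exact h0
      have hne : pvZpos d ≠ [] := fun hnil => ((pvZpos_nil_iff d).mp hnil) hd'
      cases hz : pvZpos d with
      | nil => exact absurd hz hne
      | cons q qs =>
        have hhead : (pvZpos (e :: d)).headI = q + 1 := by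
          rw [pvZpos, if_neg he, hz]; rfl
        rw [hhead]
        have herased : (e :: d).eraseIdx (q + 1) = e :: d.eraseIdx q := by simp [List.eraseIdx]
        rw [herased]
        cases xs with
        | nil => simp [pvRmz_nil, List.eraseIdx]
        | cons x xs =>
          have hx : (x :: xs).eraseIdx (q + 1) = x :: xs.eraseIdx q := by simp [List.eraseIdx]
          rw [hx, pvRmz_cons_of_ne _ _ _ _ _ he, pvRmz_cons_of_ne _ _ _ _ _ he]
          have := ih xs hd'
          rw [hz] at this
          simp only [List.headI_cons] at this
          rw [this]

-- A's loop, run n times, computes pvRmz on every list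
theorem pvLoopA (n : Nat) : ∀ (c t r d : List Int),
    n ≤ (pvZpos d).length →
    (∀ p ∈ (pvZpos d).take n, p < c.length ∧ p < t.length ∧ p < r.length) →
    (fun acc => acc.bind pvStepA)^[n] (some (c, t, r, d)) =
      some (pvRmz n d c, pvRmz n d t, pvRmz n d r, pvRmz n d d) := by
  induction n with
  | zero => intro c t r d _ _; simp [pvRmz]
  | succ n ih =>
    intro c t r d hn hlt
    have hne : pvZpos d ≠ [] := by
      intro hnil; rw [hnil] at hn; simp at hn
    have hd : (0:Int) ∈ d := by
      by_contra h; exact hne ((pvZpos_nil_iff d).mpr h)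
    cases hz : pvZpos d with
    | nil => exact absurd hz hne
    | cons p rest =>
      have hhead : (pvZpos d).headI = p := by rw [hz]; rfl
      have hpmem : p ∈ (pvZpos d).take (n+1) := by rw [hz]; simp
      obtain ⟨hc, ht, hr⟩ := hlt p hpmem
      rw [Function.iterate_succ_apply]
      simp only [Option.bind_some]
      rw [pvStepA_eq c t r d p hd hhead hc ht hr]
      have hzerase := pvZpos_erase d p rest hz
      have hrest_gt : ∀ x ∈ rest, p < x := by
        have := pvZpos_pairwise d
        rw [hz] at this
        exact (List.pairwise_cons.mp this).1
      have hn' : n ≤ (pvZpos (d.eraseIdx p)).length := by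
        rw [hzerase]; simp
        rw [hz] at hn; simp at hn; omega
      have hlt' : ∀ q ∈ (pvZpos (d.eraseIdx p)).take n,
          q < (c.eraseIdx p).length ∧ q < (t.eraseIdx p).length ∧ q < (r.eraseIdx p).length := by
        rw [hzerase, ← List.map_take]
        intro q hq
        rw [List.mem_map] at hq
        obtain ⟨q', hq', rfl⟩ := hq
        have hq'mem : q' ∈ (pvZpos d).take (n+1) := by
          rw [hz, List.take_succ_cons]
          exact List.mem_cons_of_mem _ hq'
        obtain ⟨h1, h2, h3⟩ := hlt q' hq'mem
        have hgt : p < q' := hrest_gt q' (List.mem_of_mem_take hq')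
        rw [List.length_eraseIdx_of_lt hc, List.length_eraseIdx_of_lt ht, List.length_eraseIdx_of_lt hr]
        omega
      rw [ih _ _ _ _ hn' hlt']
      rw [pvRmz_shift d c n hd, pvRmz_shift d t n hd, pvRmz_shift d r n hd, pvRmz_shift d d n hd, hhead]

-- fold of a state-only function is iteration
theorem pvFoldIter (l : List Int) (a : Option (List Int × List Int × List Int × List Int)) :
    l.foldl (fun acc _ => acc.bind pvStepA) a = (fun acc => acc.bind pvStepA)^[l.length] a := by
  induction l generalizing a with
  | nil => rfl
  | cons x l ih => simp [List.foldl_cons, ih, Function.iterate_succ_apply]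

-- B's zero-index list is pvZpos, shifted by the enumerate start
theorem pvZeros_enum (d : List Int) : ∀ (s : Int),
    ((PySem.List.enumerate d s).filter (fun q => q.2 == 0)).map (·.1) =
      (pvZpos d).map (fun k : Nat => s + (k : Int)) := by
  induction d with
  | nil => intro s; simp [PySem.List.enumerate_nil, pvZpos]
  | cons e d ih =>
    intro s
    rw [PySem.List.enumerate_cons, List.filter_cons]
    by_cases he : e = 0
    · simp only [he, show ((0:Int) == 0) = true from rfl, if_pos, List.map_cons, ih (s+1)]
      rw [pvZpos, if_pos rfl, List.map_cons, List.map_map]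
      refine List.cons_eq_cons.mpr ⟨by simp, ?_⟩
      apply List.map_congr_left; intro a _; simp; push_cast; ring
    · simp only [show (e == 0) = false from by simpa using he, Bool.false_eq_true, if_false,
        ih (s+1)]
      rw [pvZpos, if_neg he, List.map_map]
      apply List.map_congr_left; intro a _; simp; push_cast; ring

-- B's per-list filter, as a structural recursion
theorem pvKeep_enum (xs : List Int) : ∀ (Z : List Int) (s : Int),
    ((PySem.List.enumerate xs s).filter (fun q => !(PySem.Set.contains Z q.1))).map (·.2) =
      pvKeepIdx Z s xs := by
  induction xs with
  | nil => intro Z s; simp [PySem.List.enumerate_nil, pvKeepIdx]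
  | cons x xs ih =>
    intro Z s
    rw [PySem.List.enumerate_cons, List.filter_cons]
    have ih' := ih Z (s+1)
    simp only [PySem.Set.contains, List.contains_eq_mem] at ih'
    by_cases h : s ∈ Z <;>
      simp [pvKeepIdx, h, PySem.Set.contains, List.contains_eq_mem, ih']

theorem pvKeepIdx_nilZ (xs : List Int) : ∀ (s : Int), pvKeepIdx [] s xs = xs := by
  induction xs with
  | nil => intro s; rfl
  | cons x xs ih => intro s; simp [pvKeepIdx, ih]

theorem pvKeepIdx_cons_lt (xs : List Int) : ∀ (Z : List Int) (a s : Int), a < s →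
    pvKeepIdx (a :: Z) s xs = pvKeepIdx Z s xs := by
  induction xs with
  | nil => intros; rfl
  | cons x xs ih =>
    intro Z a s h
    simp [pvKeepIdx, List.contains_eq_mem, show ¬ s = a from by omega, ih Z a (s+1) (by omega)]

theorem pvKeepIdx_congr (xs : List Int) : ∀ (Z Z' : List Int) (s : Int),
    (∀ v : Int, Z.contains v = Z'.contains v) →
    pvKeepIdx Z s xs = pvKeepIdx Z' s xs := by
  induction xs with
  | nil => intros; rfl
  | cons x xs ih =>
    intro Z Z' s h
    have hm : (s ∈ Z) ↔ (s ∈ Z') := by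
      have := h s
      simp [List.contains_eq_mem] at this
      exact this
    by_cases hz : s ∈ Z' <;>
      simp [pvKeepIdx, List.contains_eq_mem, hm, hz, ih Z Z' (s+1) h]

-- the B-side filter equals pvRmz
theorem pvKeepIdx_rmz (xs : List Int) : ∀ (d : List Int) (n : Nat) (s : Int),
    pvKeepIdx (((pvZpos d).take n).map (fun k : Nat => s + (k : Int))) s xs = pvRmz n d xs := by
  induction xs with
  | nil => intro d n s; rw [pvRmz_nil]; rfl
  | cons x xs ih =>
    intro d n s
    cases d with
    | nil => cases n <;> simp [pvZpos, pvKeepIdx_nilZ, pvRmz]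
    | cons e d =>
      cases n with
      | zero => simp [pvKeepIdx_nilZ, pvRmz]
      | succ m =>
        by_cases he : e = 0
        · subst he
          have hL : (((pvZpos ((0:Int) :: d)).take (m+1)).map (fun k : Nat => s + (k : Int)))
              = s :: ((pvZpos d).take m).map (fun k : Nat => (s+1) + (k : Int)) := by
            rw [pvZpos, if_pos rfl, List.take_succ_cons, List.map_cons, ← List.map_take,
              List.map_map]
            refine List.cons_eq_cons.mpr ⟨by simp, ?_⟩
            apply List.map_congr_left; intro a _; simp; push_cast; ring
          rw [hL]
          have hsc : ((s :: ((pvZpos d).take m).map (fun k : Nat => (s+1) + (k : Int))).contains s) = true := by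
            simp
          rw [show pvKeepIdx (s :: ((pvZpos d).take m).map (fun k : Nat => (s+1) + (k : Int))) s (x :: xs)
              = pvKeepIdx (s :: ((pvZpos d).take m).map (fun k : Nat => (s+1) + (k : Int))) (s+1) xs from by
            simp [pvKeepIdx, hsc]]
          rw [pvKeepIdx_cons_lt xs _ s (s+1) (by omega), ih d m (s+1)]
          simp [pvRmz]
        · have hL : (((pvZpos (e :: d)).take (m+1)).map (fun k : Nat => s + (k : Int)))
              = ((pvZpos d).take (m+1)).map (fun k : Nat => (s+1) + (k : Int)) := by
            rw [pvZpos, if_neg he, ← List.map_take, List.map_map]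
            apply List.map_congr_left; intro a _; simp; push_cast; ring
          rw [hL]
          have hnm : s ∉ ((pvZpos d).take (m+1)).map (fun k : Nat => (s+1) + (k : Int)) := by
            intro hmem
            obtain ⟨k, _, hk⟩ := List.mem_map.mp hmem
            omega
          have hnm2 : s ∉ List.take (m+1) ((pvZpos d).map (fun k : Nat => (s+1) + (k : Int))) := by
            rw [← List.map_take]; exact hnm
          rw [show pvKeepIdx (((pvZpos d).take (m+1)).map (fun k : Nat => (s+1) + (k : Int))) s (x :: xs)
              = x :: pvKeepIdx (((pvZpos d).take (m+1)).map (fun k : Nat => (s+1) + (k : Int))) (s+1) xs from by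
            simp [pvKeepIdx, List.contains_eq_mem, hnm, hnm2]]
          rw [ih d (m+1) (s+1), pvRmz_cons_of_ne _ _ _ _ _ he]

-- Set.ofList does not change membership, hence not the filter
theorem pvContains_ofList (L : List Int) : ∀ (v : Int),
    (PySem.Set.ofList L).contains v = L.contains v := by
  intro v
  by_cases h : v ∈ L
  · have h2 := (PySem.Set.mem_ofList L v).mpr h
    simp [List.contains_eq_mem, h, h2]
  · have h2 : v ∉ PySem.Set.ofList L := fun hm => h ((PySem.Set.mem_ofList L v).mp hm)
    simp [List.contains_eq_mem, h, h2]

-- B on the trivial dead set is the identity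
theorem pvKeep_empty (xs : List Int) : pvKeep [] xs = xs := by
  rw [pvKeep, pvKeep_enum xs [] 0, pvKeepIdx_nilZ]

-- ===== VERDICT (by name: the statement is the Claim_ definition above) =====
theorem listshurtme_spec : Claim_equal_listshurtme := by
  intro death c t r d _ hpre
  unfold Spec_listshurtme listshurtme listshurtme_alt
  have hempty : (PySem.Set.empty : PySem.Set Int) = ([] : List Int) := rfl
  by_cases hd : (0:Int) ∈ d
  · -- zeros exist
    have hcount : PySem.List.count d 0 > 0 := by
      rw [PySem.List.count_eq]; exact List.count_pos_iff.mpr hd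
    rw [if_pos hcount]
    by_cases hdeath : death ≤ 0
    · -- loop body never runs
      rw [PySem.List.pyRange_one_eq_nil hdeath]
      simp only [List.foldl_nil, Option.getD_some]
      rw [pvDead, if_neg (by omega)]
      rw [hempty, pvKeep_empty, pvKeep_empty, pvKeep_empty, pvKeep_empty]
    · -- the real loop
      push_neg at hdeath
      have hP : death.toNat ≤ (pvZpos d).length ∧
          ∀ p ∈ (pvZpos d).take death.toNat, p < c.length ∧ p < t.length ∧ p < r.length := by
        rcases hpre with h | h | h
        · omega
        · exact absurd hd h
        · exact h
      -- A side
      rw [pvFoldIter, PySem.List.length_pyRange_one]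
      rw [show (death - 0).toNat = death.toNat from by omega]
      rw [pvLoopA death.toNat c t r d hP.1 hP.2, Option.getD_some]
      -- B side
      rw [pvDead, if_pos hdeath, pvZeros_enum d 0]
      rw [PySem.List.slice_to _ (by omega : (0:Int) ≤ death), ← List.map_take]
      have hkeep : ∀ xs : List Int,
          pvKeep (PySem.Set.ofList (((pvZpos d).take death.toNat).map (fun k : Nat => (0:Int) + (k : Int)))) xs
            = pvRmz death.toNat d xs := by
        intro xs
        rw [pvKeep, pvKeep_enum]
        rw [pvKeepIdx_congr xs _ (((pvZpos d).take death.toNat).map (fun k : Nat => (0:Int) + (k : Int))) 0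
          (pvContains_ofList _)]
        exact pvKeepIdx_rmz xs d death.toNat 0
      rw [hkeep c, hkeep t, hkeep r, hkeep d]
  · -- no zeros: both sides return the input
    have hcount : ¬ PySem.List.count d 0 > 0 := by
      rw [PySem.List.count_eq]
      simp [List.count_eq_zero_of_not_mem hd]
    rw [if_neg hcount]
    have hz : pvZpos d = [] := (pvZpos_nil_iff d).mpr hd
    by_cases hdeath : death > 0
    · rw [pvDead, if_pos hdeath, pvZeros_enum d 0, hz]
      rw [List.map_nil, PySem.List.slice_to _ (by omega : (0:Int) ≤ death), List.take_nil]
      rw [show PySem.Set.ofList ([] : List Int) = ([] : List Int) from rfl]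
      rw [pvKeep_empty, pvKeep_empty, pvKeep_empty, pvKeep_empty]
    · rw [pvDead, if_neg hdeath, hempty]
      rw [pvKeep_empty, pvKeep_empty, pvKeep_empty, pvKeep_empty]
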